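-- pv_equiv track=rewrite | github.com/udjapanese/cabocha2ud | lib/iterate_function.py | iterate_bunsetu
-- ===== SOURCE A (Python) =====
-- def iterate_bunsetu(lines):
--     """
--         iterate bunsetu
--     """
--     if not lines[0].startswith("* "):
--         raise TypeError("parse Error: first line must be `* `")
--     sent = [lines[0]]
--     for line in lines[1:]:
--         if line.startswith("* "):
--             yield sent
--             sent = [line]
--         else:
--             sent.append(line)
--     yield sent
-- ===== SOURCE B (Python) =====
-- def iterate_bunsetu(lines):
--     """
--         iterate bunsetu
--     """
--     if not lines[0].startswith("* "):
--         raise TypeError("parse Error: first line must be `* `")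
--     bounds = [i for i, line in enumerate(lines) if line.startswith("* ")]
--     bounds.append(len(lines))
--     for start, end in zip(bounds, bounds[1:]):
--         yield lines[start:end]
-- ===== Notes on version B (the rewrite author's own statement) =====
-- stated objective: alternative
-- what changed: B first collects all boundary indices (positions of '* ' lines plus a final sentinel len(lines)) and then yields lines[start:end] for consecutive boundary pairs, replacing A's single forward scan that accumulates the current segment and flushes it at each marker; Pre_ excludes the empty list and inputs whose first line does not start with '* ', on which A raises IndexError/TypeError.
import Mathlib
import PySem

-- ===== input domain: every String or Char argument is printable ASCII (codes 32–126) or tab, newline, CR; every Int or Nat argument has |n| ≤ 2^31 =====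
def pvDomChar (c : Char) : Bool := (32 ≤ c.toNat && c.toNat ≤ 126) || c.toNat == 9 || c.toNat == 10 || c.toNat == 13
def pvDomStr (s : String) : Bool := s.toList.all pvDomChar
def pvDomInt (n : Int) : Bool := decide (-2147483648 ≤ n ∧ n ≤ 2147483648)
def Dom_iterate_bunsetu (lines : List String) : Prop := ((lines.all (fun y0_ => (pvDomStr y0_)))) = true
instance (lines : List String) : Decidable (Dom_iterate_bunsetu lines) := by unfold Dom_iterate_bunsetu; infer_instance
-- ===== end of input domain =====

-- B computes the list of '* '-boundary indices once and yields lines[start:end] per consecutive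
-- pair, instead of A's forward scan with a running segment accumulator; same cost (alternative).

-- ===== PORT A =====
-- forward scan: state = (segments emitted so far, current segment)
def iterate_bunsetu (lines : List String) : List (List String) :=
  match lines with
  | [] => []  -- lines[0] raises IndexError; excluded by Pre_
  | l0 :: rest =>
    if ¬ PySem.Str.startswith l0 "* " then []  -- raise TypeError; excluded by Pre_
    else
      let st := rest.foldl
        (fun (st : List (List String) × List String) (line : String) =>
          if PySem.Str.startswith line "* " then (st.1 ++ [st.2], [line])
          else (st.1, st.2 ++ [line]))
        ([], [l0])
      st.1 ++ [st.2]

-- ===== PORT B =====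
-- boundary indices (enumerate + filter) plus a length sentinel, then one slice per pair
def iterate_bunsetu_alt (lines : List String) : List (List String) :=
  match lines with
  | [] => []  -- lines[0] raises IndexError; excluded by Pre_
  | l0 :: _ =>
    if ¬ PySem.Str.startswith l0 "* " then []  -- raise TypeError; excluded by Pre_
    else
      let bounds : List Int :=
        ((PySem.List.enumerate lines 0).filter (fun p => PySem.Str.startswith p.2 "* ")).map Prod.fst
          ++ [(lines.length : Int)]
      (bounds.zip bounds.tail).map (fun p => PySem.List.slice lines (some p.1) (some p.2))

-- ===== PRECONDITION & SPEC =====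
-- Pre_: lines nonempty and first line starts with "* " (otherwise A raises IndexError / TypeError).
def Pre_iterate_bunsetu (lines : List String) : Prop :=
  lines ≠ [] ∧ PySem.Str.startswith (lines.headD "") "* " = true
instance (lines : List String) : Decidable (Pre_iterate_bunsetu lines) := by
  unfold Pre_iterate_bunsetu; infer_instance

def pvWitness_iterate_bunsetu : List String := ["* 1", "a", "b", "* 2", "c"]

def Spec_iterate_bunsetu (lines : List String) (out : List (List String)) : Prop := out = iterate_bunsetu_alt lines
instance (lines : List String) (out : List (List String)) : Decidable (Spec_iterate_bunsetu lines out) := by unfold Spec_iterate_bunsetu; infer_instance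

-- ===== CLAIM (what is proved, stated in full; the proofs are below) =====
def Claim_equal_iterate_bunsetu : Prop := ∀ (lines : List String), Dom_iterate_bunsetu lines → Pre_iterate_bunsetu lines → Spec_iterate_bunsetu lines (iterate_bunsetu lines)

-- ===== LEMMAS AND PROOFS =====

-- a line opens a new segment
def pvMark (l : String) : Bool := PySem.Str.startswith l "* "

-- reference grouping: segments of `rest` with `sent` the open segment (A's invariant shape)
def pvG (sent : List String) (rest : List String) : List (List String) :=
  match rest with
  | [] => [sent]
  | l :: ls =>
    if pvMark l then sent :: pvG [l] ls
    else pvG (sent ++ [l]) ls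

-- A's step function
def pvStepA (st : List (List String) × List String) (line : String) :
    List (List String) × List String :=
  if PySem.Str.startswith line "* " then (st.1 ++ [st.2], [line])
  else (st.1, st.2 ++ [line])

-- A's fold computes pvG
theorem pvA_fold (rest : List String) (acc : List (List String)) (sent : List String) :
    (rest.foldl pvStepA (acc, sent)).1 ++ [(rest.foldl pvStepA (acc, sent)).2]
      = acc ++ pvG sent rest := by
  induction rest generalizing acc sent with
  | nil => simp only [List.foldl_nil, pvG]
  | cons l ls ih =>
    simp only [List.foldl_cons]
    by_cases h : PySem.Str.startswith l "* " = true
    · rw [pvStepA, if_pos h, ih, pvG, if_pos (by simpa [pvMark] using h)]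
      simp only [List.append_assoc, List.singleton_append]
    · rw [pvStepA, if_neg h, ih, pvG, if_neg (by simpa [pvMark] using h)]

-- closed-segment form of pvG
def pvSegsSpec : List String → List (List String)
  | [] => []
  | x :: xs =>
    if pvMark x then (x :: xs.takeWhile (fun l => !pvMark l)) :: pvSegsSpec xs
    else pvSegsSpec xs

theorem pvG_segsSpec (xs : List String) (sent : List String) :
    pvG sent xs = (sent ++ xs.takeWhile (fun l => !pvMark l)) :: pvSegsSpec xs := by
  induction xs generalizing sent with
  | nil => simp [pvG, pvSegsSpec]
  | cons x xs ih =>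
    by_cases h : pvMark x = true
    · rw [pvG, if_pos h, ih, pvSegsSpec]
      simp [h]
    · rw [pvG, if_neg h, ih, pvSegsSpec]
      simp [h]

-- boundary indices of a line list, as Nats
def pvMarksN : List String → List Nat
  | [] => []
  | x :: xs => (if pvMark x then [0] else []) ++ (pvMarksN xs).map (· + 1)

def pvBoundsN (xs : List String) : List Nat := pvMarksN xs ++ [xs.length]

-- B's filtered enumeration yields the boundary indices, shifted by the start
theorem pvEnum_marks (xs : List String) (s : Int) :
    ((PySem.List.enumerate xs s).filter (fun p => PySem.Str.startswith p.2 "* ")).map Prod.fst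
      = (pvMarksN xs).map (fun (k : Nat) => s + (k : Int)) := by
  induction xs generalizing s with
  | nil => simp [PySem.List.enumerate_nil, pvMarksN]
  | cons x xs ih =>
    rw [PySem.List.enumerate_cons, List.filter_cons]
    by_cases h : PySem.Str.startswith x "* " = true
    · rw [if_pos (by simpa using h), List.map_cons, ih, pvMarksN,
        if_pos (show pvMark x = true by simpa [pvMark] using h)]
      rw [List.singleton_append, List.map_cons, List.map_map]
      refine congrArg₂ List.cons (by simp) ?_
      apply List.map_congr_left
      intro k _
      simp only [Function.comp_apply]
      push_cast
      ring
    · rw [if_neg (by simpa using h), ih, pvMarksN,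
        if_neg (show ¬ pvMark x = true by simpa [pvMark] using h)]
      rw [List.nil_append, List.map_map]
      apply List.map_congr_left
      intro k _
      simp only [Function.comp_apply]
      push_cast
      ring

-- segments from a Nat boundary list by drop/take
def pvSegsOf (lines : List String) (bs : List Nat) : List (List String) :=
  (bs.zip bs.tail).map (fun p => (lines.drop p.1).take (p.2 - p.1))

-- shifting every boundary by one and consing a line leaves the segments unchanged
theorem pvSegsOf_shift (x : String) (xs : List String) (bs : List Nat) :
    pvSegsOf (x :: xs) (bs.map (· + 1)) = pvSegsOf xs bs := by
  unfold pvSegsOf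
  rw [← List.map_tail, List.zip_map, List.map_map]
  apply List.map_congr_left
  intro p _
  simp [Nat.succ_sub_succ]

theorem pvBoundsN_ne_nil (xs : List String) : pvBoundsN xs ≠ [] := by
  unfold pvBoundsN; simp

-- the first boundary of `xs` is the length of its markerless prefix
theorem pvBoundsN_head (xs : List String) :
    (pvBoundsN xs).headD 0 = (xs.takeWhile (fun l => !pvMark l)).length := by
  induction xs with
  | nil => simp [pvBoundsN, pvMarksN]
  | cons x xs ih =>
    by_cases h : pvMark x = true
    · simp [pvBoundsN, pvMarksN, h]
    · simp only [pvBoundsN, pvMarksN, h] at ih ⊢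
      simp [h]
      cases hm : pvMarksN xs with
      | nil => simpa [hm] using ih
      | cons b bs => simpa [hm] using ih

-- peeling a leading 0 boundary takes one prefix segment
theorem pvSegsOf_cons_zero (lines : List String) (b : Nat) (bs : List Nat) :
    pvSegsOf lines (0 :: b :: bs) = lines.take b :: pvSegsOf lines (b :: bs) := by
  unfold pvSegsOf
  simp

-- main: segments from the boundary list are the closed-segment spec
theorem pvSegsOf_bounds (xs : List String) :
    pvSegsOf xs (pvBoundsN xs) = pvSegsSpec xs := by
  induction xs with
  | nil => simp [pvSegsOf, pvBoundsN, pvMarksN, pvSegsSpec]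
  | cons x xs ih =>
    by_cases h : pvMark x = true
    · obtain ⟨b, bs, hb⟩ := List.exists_cons_of_ne_nil (pvBoundsN_ne_nil xs)
      have hhead : b = (xs.takeWhile (fun l => !pvMark l)).length := by
        have := pvBoundsN_head xs; rw [hb] at this; simpa using this
      have hshape : pvBoundsN (x :: xs) = 0 :: (b + 1) :: bs.map (· + 1) := by
        have h1 : pvBoundsN (x :: xs) = 0 :: (pvBoundsN xs).map (· + 1) := by
          simp [pvBoundsN, pvMarksN, h]
        rw [h1, hb, List.map_cons]
      rw [hshape, pvSegsOf_cons_zero]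
      have h2 : ((b + 1) :: bs.map (· + 1)) = (b :: bs).map (· + 1) := by
        rw [List.map_cons]
      rw [h2, pvSegsOf_shift, ← hb, ih, pvSegsSpec, if_pos h]
      congr 1
      rw [List.take_succ_cons, hhead]
      congr 1
      exact (List.prefix_iff_eq_take.mp (List.takeWhile_prefix _)).symm
    · have hshape : pvBoundsN (x :: xs) = (pvBoundsN xs).map (· + 1) := by
        simp [pvBoundsN, pvMarksN, h]
      rw [hshape, pvSegsOf_shift, ih, pvSegsSpec, if_neg h]

-- casting a Nat boundary list to Int and slicing is drop/take
theorem pvSlice_cast (lines : List String) (bs : List Nat) :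
    (((bs.map (fun (k : Nat) => (k : Int))).zip ((bs.map (fun (k : Nat) => (k : Int))).tail)).map
        (fun p => PySem.List.slice lines (some p.1) (some p.2)))
      = pvSegsOf lines bs := by
  unfold pvSegsOf
  rw [← List.map_tail, List.zip_map, List.map_map]
  apply List.map_congr_left
  intro p _
  simp only [Function.comp_apply, Prod.map_fst, Prod.map_snd]
  exact PySem.List.slice_natCast lines p.1 p.2

-- ===== VERDICT (by name: the statement is the Claim_ definition above) =====
theorem iterate_bunsetu_spec : Claim_equal_iterate_bunsetu := by
  intro lines _ hpre
  obtain ⟨hne, hstart⟩ := hpre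
  unfold Spec_iterate_bunsetu
  cases lines with
  | nil => exact absurd rfl hne
  | cons l0 rest =>
    simp only [List.headD_cons] at hstart
    show (if ¬ PySem.Str.startswith l0 "* " = true then ([] : List (List String))
          else (rest.foldl pvStepA ([], [l0])).1 ++ [(rest.foldl pvStepA ([], [l0])).2])
        = (if ¬ PySem.Str.startswith l0 "* " = true then ([] : List (List String))
          else
            (((((PySem.List.enumerate (l0 :: rest) 0).filter
                  (fun p => PySem.Str.startswith p.2 "* ")).map Prod.fst
                ++ [((l0 :: rest).length : Int)]).zip
              ((((PySem.List.enumerate (l0 :: rest) 0).filter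
                  (fun p => PySem.Str.startswith p.2 "* ")).map Prod.fst
                ++ [((l0 :: rest).length : Int)]).tail)).map
              (fun p => PySem.List.slice (l0 :: rest) (some p.1) (some p.2))))
    rw [if_neg (fun hc => hc hstart), if_neg (fun hc => hc hstart)]
    rw [pvA_fold, List.nil_append]
    have hbounds :
        (((PySem.List.enumerate (l0 :: rest) 0).filter
            (fun p => PySem.Str.startswith p.2 "* ")).map Prod.fst
          ++ [((l0 :: rest).length : Int)])
        = (pvBoundsN (l0 :: rest)).map (fun (k : Nat) => (k : Int)) := by
      rw [pvEnum_marks]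
      unfold pvBoundsN
      rw [List.map_append]
      simp
    rw [hbounds, pvSlice_cast, pvSegsOf_bounds]
    rw [pvG_segsSpec, pvSegsSpec, if_pos (by simpa [pvMark] using hstart)]
    simp
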